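-- pv_equiv track=rewrite | github.com/alienbigking/officialWebsite | scripts/download_unitree_images.py | extract_urls_from_srcset
-- ===== SOURCE A (Python) =====
-- def extract_urls_from_srcset(srcset: str) -> list[str]:
--     # e.g. "a.jpg 1x, b.jpg 2x" or "a.jpg 480w, b.jpg 960w"
--     urls: list[str] = []
--     for part in srcset.split(","):
--         part = part.strip()
--         if not part:
--             continue
--         token = part.split()[0].strip()
--         if token:
--             urls.append(token)
--     return urls
-- ===== SOURCE B (Python) =====
-- def extract_urls_from_srcset(srcset: str) -> list[str]:
--     # Single pass over the characters: collect the first whitespace-free run of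
--     # each comma-separated segment; no split/strip intermediates.
--     urls: list[str] = []
--     cur: list[str] = []
--     done = False  # first token of the current segment already finished
--     for ch in srcset:
--         if ch == ',':
--             if cur:
--                 urls.append(''.join(cur))
--             cur = []
--             done = False
--         elif ch.isspace():
--             done = done or bool(cur)
--         elif not done:
--             cur.append(ch)
--     if cur:
--         urls.append(''.join(cur))
--     return urls
-- ===== Notes on version B (the rewrite author's own statement) =====
-- stated objective: alternative
-- what changed: B replaces A's split-on-comma / strip / inner whitespace-split pipeline by a single character-by-character scan that accumulates the first whitespace-free run of each comma segment in one pass with no intermediate substrings.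
import Mathlib
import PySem

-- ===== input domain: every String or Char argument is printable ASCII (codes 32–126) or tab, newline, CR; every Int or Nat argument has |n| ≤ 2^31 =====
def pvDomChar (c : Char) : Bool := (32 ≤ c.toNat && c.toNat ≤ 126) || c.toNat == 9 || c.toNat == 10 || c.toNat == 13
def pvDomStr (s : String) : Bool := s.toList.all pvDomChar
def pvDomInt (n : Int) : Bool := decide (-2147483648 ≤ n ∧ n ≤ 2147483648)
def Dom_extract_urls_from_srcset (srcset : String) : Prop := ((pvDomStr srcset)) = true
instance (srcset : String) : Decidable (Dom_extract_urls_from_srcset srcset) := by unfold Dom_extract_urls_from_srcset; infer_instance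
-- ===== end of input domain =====

-- B replaces A's split/strip pipeline by a single character scan that collects the
-- first whitespace-free run of each comma segment (objective: alternative).


-- ===== PORT A =====
-- A's loop body: strip the part, skip if empty, take the first whitespace token, strip it,
-- append if non-empty.  (The [] match arm is unreachable: Python's part.split()[0] is taken
-- only when the stripped part is non-empty, so split() is non-empty there.)
def aStep (urls : List String) (part0 : List Char) : List String :=
  let part := PySem.Chars.strip part0
  if part.isEmpty then urls
  else
    match PySem.Chars.split₀ part with
    | [] => urls
    | t :: _ =>
      let token := PySem.Chars.strip t
      if token.isEmpty then urls else urls ++ [String.ofList token]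

def extract_urls_from_srcset (srcset : String) : List String :=
  (PySem.Chars.splitOn srcset.toList [',']).foldl aStep []

-- ===== PORT B =====
-- B's per-character step: state = (urls so far, first token of current segment so far,
-- whether that token is already finished).
def altStep (st : List String × List Char × Bool) (c : Char) : List String × List Char × Bool :=
  if c = ',' then
    ((if st.2.1.isEmpty then st.1 else st.1 ++ [String.ofList st.2.1]), [], false)
  else if PySem.Chars.isspace c then
    (st.1, st.2.1, st.2.2 || !st.2.1.isEmpty)
  else if st.2.2 then st
  else (st.1, st.2.1 ++ [c], st.2.2)

def extract_urls_from_srcset_alt (srcset : String) : List String :=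
  let st := srcset.toList.foldl altStep ([], [], false)
  if st.2.1.isEmpty then st.1 else st.1 ++ [String.ofList st.2.1]

-- ===== PRECONDITION & SPEC =====
def Spec_extract_urls_from_srcset (srcset : String) (out : List String) : Prop := out = extract_urls_from_srcset_alt srcset
instance (srcset : String) (out : List String) : Decidable (Spec_extract_urls_from_srcset srcset out) := by unfold Spec_extract_urls_from_srcset; infer_instance

-- ===== CLAIM (what is proved, stated in full; the proofs are below) =====
def Claim_equal_extract_urls_from_srcset : Prop := ∀ (srcset : String), Dom_extract_urls_from_srcset srcset → Spec_extract_urls_from_srcset srcset (extract_urls_from_srcset srcset)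

-- ===== LEMMAS AND PROOFS =====

-- abbreviation: "not a space"
def nsp (c : Char) : Bool := !PySem.Chars.isspace c

-- split at commas: (first segment, remaining segments)
def splitC : List Char → List Char × List (List Char)
  | [] => ([], [])
  | c :: r =>
    let p := splitC r
    if c = ',' then ([], p.1 :: p.2) else (c :: p.1, p.2)

-- the first whitespace-free token of a segment
def tok (p : List Char) : List Char := (p.dropWhile PySem.Chars.isspace).takeWhile nsp

def wrap (t : List Char) : List String := if t = [] then [] else [String.ofList t]

-- common reference value
def refOut (l : List Char) : List String :=
  wrap (tok (splitC l).1) ++ (splitC l).2.flatMap (fun p => wrap (tok p))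

-- ---- A side ----

theorem splitOn_go_spec (l : List Char) : ∀ (fuel : Nat) (cur : List Char) (acc : List (List Char)),
    l.length < fuel →
    PySem.Chars.splitOn.go [','] fuel l cur acc =
      acc.reverse ++ (cur.reverse ++ (splitC l).1) :: (splitC l).2 := by
  induction l with
  | nil =>
    intro fuel cur acc h
    match fuel, h with
    | fuel+1, _ => simp [PySem.Chars.splitOn.go, splitC]
  | cons c r ih =>
    intro fuel cur acc h
    match fuel, h with
    | fuel+1, h =>
      show (if [','].isPrefixOf (c :: r) then
              PySem.Chars.splitOn.go [','] fuel (List.drop 1 (c::r)) [] (cur.reverse :: acc)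
            else PySem.Chars.splitOn.go [','] fuel r (c :: cur) acc) = _
      by_cases hc : c = ','
      · subst hc
        simp only [List.isPrefixOf, beq_self_eq_true, Bool.true_and,
          if_pos, List.drop_one, List.tail_cons]
        rw [ih fuel [] (cur.reverse :: acc) (by simpa using Nat.lt_of_succ_lt_succ h)]
        simp [splitC]
      · have hpre : [','].isPrefixOf (c :: r) = false := by
          simp [List.isPrefixOf]; exact fun h' => absurd h'.symm hc
        rw [hpre]
        simp only [Bool.false_eq_true, if_false]
        rw [ih fuel (c :: cur) acc (by simp at h; omega)]
        simp [splitC, hc]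

theorem splitOn_comma (l : List Char) :
    PySem.Chars.splitOn l [','] = (splitC l).1 :: (splitC l).2 := by
  show PySem.Chars.splitOn.go [','] (l.length + 1) l [] [] = _
  rw [splitOn_go_spec l (l.length + 1) [] [] (Nat.lt_succ_self _)]
  simp

-- ---- strip / split₀ facts ----

theorem rstrip_eq_nil_iff (y : List Char) :
    PySem.Chars.rstrip y = [] ↔ List.dropWhile PySem.Chars.isspace y.reverse = [] := by
  constructor
  · intro h
    have := congrArg List.reverse h
    simpa [PySem.Chars.rstrip] using this
  · intro h; simp [PySem.Chars.rstrip, h]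

theorem rstrip_cons (c : Char) (r : List Char) :
    PySem.Chars.rstrip (c :: r) =
      (if PySem.Chars.rstrip r = [] then (if PySem.Chars.isspace c then [] else [c])
       else c :: PySem.Chars.rstrip r) := by
  by_cases h : List.dropWhile PySem.Chars.isspace r.reverse = []
  · rw [if_pos ((rstrip_eq_nil_iff r).mpr h)]
    show (List.dropWhile PySem.Chars.isspace ((c :: r).reverse)).reverse = _
    rw [List.reverse_cons, List.dropWhile_append, h]
    by_cases hc : PySem.Chars.isspace c <;> simp [hc]
  · rw [if_neg (fun hx => h ((rstrip_eq_nil_iff r).mp hx))]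
    show (List.dropWhile PySem.Chars.isspace ((c :: r).reverse)).reverse = _
    rw [List.reverse_cons, List.dropWhile_append]
    have he : (List.dropWhile PySem.Chars.isspace r.reverse).isEmpty = false := by
      simpa [List.isEmpty_iff] using h
    rw [he]
    simp [PySem.Chars.rstrip]

theorem takeWhile_rstrip (y : List Char) :
    (PySem.Chars.rstrip y).takeWhile nsp = y.takeWhile nsp := by
  induction y with
  | nil => simp [PySem.Chars.rstrip]
  | cons c r ih =>
    rw [rstrip_cons]
    by_cases hs : PySem.Chars.isspace c
    · have hn : nsp c = false := by simp [nsp, hs]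
      by_cases h1 : PySem.Chars.rstrip r = []
      · rw [if_pos h1]; simp [hs, hn]
      · rw [if_neg h1]; simp [hn]
    · have hn : nsp c = true := by simp [nsp, hs]
      by_cases h1 : PySem.Chars.rstrip r = []
      · rw [if_pos h1]
        have h0 : r.takeWhile nsp = [] := by rw [← ih, h1]; simp
        simp [hs, hn, h0]
      · rw [if_neg h1]; simp [hn, ih]

theorem split₀_go_acc (l : List Char) : ∀ (cur : List Char) (acc : List (List Char)),
    PySem.Chars.split₀.go l cur acc = acc.reverse ++ PySem.Chars.split₀.go l cur [] := by
  induction l with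
  | nil =>
    intro cur acc
    show (if cur.isEmpty then acc.reverse else (cur.reverse :: acc).reverse) = _
    by_cases h : cur.isEmpty <;> simp [h, PySem.Chars.split₀.go]
  | cons c r ih =>
    intro cur acc
    show (if PySem.Chars.isspace c then _ else _) = _
    by_cases hs : PySem.Chars.isspace c
    · simp only [hs, if_pos]
      by_cases hc : cur.isEmpty
      · simp only [hc, if_pos]
        conv_rhs => rw [show PySem.Chars.split₀.go (c :: r) cur [] =
          (if PySem.Chars.isspace c then (if cur.isEmpty then PySem.Chars.split₀.go r [] ([] : List (List Char)) else PySem.Chars.split₀.go r [] [cur.reverse]) else PySem.Chars.split₀.go r (c :: cur) []) from rfl]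
        simp only [hs, hc, if_pos]
        exact ih [] acc
      · simp only [hc, Bool.false_eq_true, if_false]
        rw [ih [] (cur.reverse :: acc)]
        conv_rhs => rw [show PySem.Chars.split₀.go (c :: r) cur [] =
          (if PySem.Chars.isspace c then (if cur.isEmpty then PySem.Chars.split₀.go r [] ([] : List (List Char)) else PySem.Chars.split₀.go r [] [cur.reverse]) else PySem.Chars.split₀.go r (c :: cur) []) from rfl]
        rw [ih [] [cur.reverse]]
        simp [hs, hc]
    · simp only [hs, Bool.false_eq_true, if_false]
      rw [ih (c :: cur) acc]
      conv_rhs => rw [show PySem.Chars.split₀.go (c :: r) cur [] =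
        (if PySem.Chars.isspace c then (if cur.isEmpty then PySem.Chars.split₀.go r [] ([] : List (List Char)) else PySem.Chars.split₀.go r [] [cur.reverse]) else PySem.Chars.split₀.go r (c :: cur) []) from rfl]
      simp [hs]

theorem split₀_go_first (l : List Char) : ∀ (cur : List Char), cur ≠ [] →
    ∃ ts, PySem.Chars.split₀.go l cur [] = (cur.reverse ++ l.takeWhile nsp) :: ts := by
  induction l with
  | nil =>
    intro cur hc
    exact ⟨[], by simp [PySem.Chars.split₀.go, hc]⟩
  | cons c r ih =>
    intro cur hc
    show (∃ ts, (if PySem.Chars.isspace c then (if cur.isEmpty then PySem.Chars.split₀.go r [] ([] : List (List Char)) else PySem.Chars.split₀.go r [] [cur.reverse]) else PySem.Chars.split₀.go r (c :: cur) []) = _)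
    by_cases hs : PySem.Chars.isspace c
    · have hce : cur.isEmpty = false := by simp [hc]
      refine ⟨PySem.Chars.split₀.go r [] [], ?_⟩
      rw [if_pos hs, hce]
      simp only [Bool.false_eq_true, if_false]
      rw [split₀_go_acc r [] [cur.reverse]]
      have ht : (c :: r).takeWhile nsp = [] := by simp [nsp, hs]
      simp [ht]
    · obtain ⟨ts, hts⟩ := ih (c :: cur) (by simp)
      refine ⟨ts, ?_⟩
      rw [if_neg (by simp [hs])]
      rw [hts]
      have ht : (c :: r).takeWhile nsp = c :: r.takeWhile nsp := by
        simp [nsp, hs]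
      simp [ht]

theorem split₀_head (c : Char) (z : List Char) (hc : PySem.Chars.isspace c = false) :
    ∃ ts, PySem.Chars.split₀ (c :: z) = ((c :: z).takeWhile nsp) :: ts := by
  show ∃ ts, PySem.Chars.split₀.go (c :: z) [] [] = _
  have step : PySem.Chars.split₀.go (c :: z) [] [] = PySem.Chars.split₀.go z [c] [] := by
    show (if PySem.Chars.isspace c then _ else PySem.Chars.split₀.go z [c] []) = _
    rw [if_neg (by simp [hc])]
  obtain ⟨ts, hts⟩ := split₀_go_first z [c] (by simp)
  refine ⟨ts, ?_⟩
  rw [step, hts]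
  simp [nsp, hc]

theorem dropWhile_cons_false {q : Char → Bool} {p : List Char} {c : Char} {z : List Char}
    (h : p.dropWhile q = c :: z) : q c = false := by
  induction p with
  | nil => simp at h
  | cons a r ih =>
    rw [List.dropWhile_cons] at h
    by_cases ha : q a
    · rw [if_pos ha] at h; exact ih h
    · rw [if_neg ha] at h
      injection h with h1 h2
      subst h1; simpa using ha

theorem strip_of_all_nsp (t : List Char) (h : ∀ x ∈ t, nsp x = true) :
    PySem.Chars.strip t = t := by
  have hl : PySem.Chars.lstrip t = t := by
    cases t with
    | nil => rfl
    | cons a r =>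
      have : PySem.Chars.isspace a = false := by
        have := h a (by simp); simpa [nsp] using this
      show List.dropWhile PySem.Chars.isspace (a :: r) = a :: r
      rw [List.dropWhile_cons, if_neg (by simp [this])]
  show PySem.Chars.rstrip (PySem.Chars.lstrip t) = t
  rw [hl]
  cases ht : t.reverse with
  | nil =>
    have ht0 : t = [] := by simpa using congrArg List.reverse ht
    subst ht0; rfl
  | cons a r =>
    have ha : PySem.Chars.isspace a = false := by
      have hm : a ∈ t := by
        have : a ∈ t.reverse := ht ▸ List.mem_cons_self ..
        simpa using this
      have := h a hm; simpa [nsp] using this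
    show (List.dropWhile PySem.Chars.isspace t.reverse).reverse = t
    rw [ht, List.dropWhile_cons, if_neg (by simp [ha]), ← ht, List.reverse_reverse]

theorem aStep_eq (urls : List String) (p : List Char) :
    aStep urls p = urls ++ wrap (tok p) := by
  unfold aStep
  cases hd : p.dropWhile PySem.Chars.isspace with
  | nil =>
    have hs : PySem.Chars.strip p = [] := by
      show PySem.Chars.rstrip (PySem.Chars.lstrip p) = []
      simp [PySem.Chars.lstrip, hd, PySem.Chars.rstrip]
    have ht : tok p = [] := by simp [tok, hd]
    simp [hs, ht, wrap]
  | cons c z =>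
    have hc : PySem.Chars.isspace c = false := dropWhile_cons_false hd
    have hstrip : PySem.Chars.strip p = PySem.Chars.rstrip (c :: z) := by
      show PySem.Chars.rstrip (PySem.Chars.lstrip p) = _
      simp [PySem.Chars.lstrip, hd]
    -- strip p is c :: something
    obtain ⟨w, hw⟩ : ∃ w, PySem.Chars.strip p = c :: w := by
      rw [hstrip, rstrip_cons]
      by_cases h1 : PySem.Chars.rstrip z = []
      · exact ⟨[], by rw [if_pos h1, if_neg (by simp [hc])]⟩
      · exact ⟨PySem.Chars.rstrip z, by rw [if_neg h1]⟩
    have htw : (PySem.Chars.strip p).takeWhile nsp = tok p := by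
      rw [hstrip]
      rw [takeWhile_rstrip]
      simp [tok, hd]
    obtain ⟨ts, hts⟩ := by
      have := split₀_head c w (by simpa using hc)
      rwa [← hw] at this
    have htok : tok p = c :: (z.takeWhile nsp) := by
      simp [tok, hd, nsp, hc]
    have htokne : tok p ≠ [] := by simp [htok]
    have hall : ∀ x ∈ tok p, nsp x = true := by
      intro x hx
      exact List.mem_takeWhile_imp (by simpa [tok] using hx)
    have hts' : PySem.Chars.split₀ (PySem.Chars.strip p) = tok p :: ts := by
      rw [hts, ← htw, hw]
    have hne : (PySem.Chars.strip p).isEmpty = false := by rw [hw]; rfl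
    simp only [hne, Bool.false_eq_true, if_false]
    rw [hts']
    simp only [strip_of_all_nsp (tok p) hall]
    simp [List.isEmpty_iff, htokne, wrap]

theorem aFold (parts : List (List Char)) : ∀ urls,
    parts.foldl aStep urls = urls ++ parts.flatMap (fun p => wrap (tok p)) := by
  induction parts with
  | nil => intro urls; simp
  | cons p ps ih =>
    intro urls
    rw [List.foldl_cons, aStep_eq, ih]
    simp

theorem a_eq_ref (s : String) : extract_urls_from_srcset s = refOut s.toList := by
  unfold extract_urls_from_srcset refOut
  rw [splitOn_comma, aFold]
  simp

-- ---- B side ----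

def firstOut (cur : List Char) (done : Bool) (s : List Char) : List Char :=
  if done then cur else if cur = [] then tok s else cur ++ s.takeWhile nsp

def flushSt (st : List String × List Char × Bool) : List String :=
  if st.2.1.isEmpty then st.1 else st.1 ++ [String.ofList st.2.1]

theorem firstOut_nil (cur : List Char) (done : Bool) : firstOut cur done [] = cur := by
  unfold firstOut
  split_ifs with h1 h2
  · rfl
  · simp [h2, tok]
  · simp

theorem alt_go (l : List Char) : ∀ (urls : List String) (cur : List Char) (done : Bool),
    flushSt (l.foldl altStep (urls, cur, done)) =
      urls ++ wrap (firstOut cur done (splitC l).1) ++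
        (splitC l).2.flatMap (fun p => wrap (tok p)) := by
  induction l with
  | nil =>
    intro urls cur done
    have h1 : splitC ([] : List Char) = ([], []) := rfl
    simp only [h1]
    rw [firstOut_nil]
    by_cases h : cur = [] <;> simp [flushSt, wrap, h, List.isEmpty_iff]
  | cons c r ih =>
    intro urls cur done
    rw [List.foldl_cons]
    by_cases hc : c = ','
    · subst hc
      have hstep : altStep (urls, cur, done) ',' =
          ((if cur.isEmpty then urls else urls ++ [String.ofList cur]), [], false) := by
        simp [altStep]
      rw [hstep, ih]
      have hsp : splitC (',' :: r) = ([], (splitC r).1 :: (splitC r).2) := by simp [splitC]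
      rw [hsp]
      have h1 : firstOut ([] : List Char) false (splitC r).1 = tok (splitC r).1 := by
        simp [firstOut]
      rw [h1, firstOut_nil]
      by_cases h : cur = [] <;> simp [wrap, h, List.isEmpty_iff]
    · have hsp : splitC (c :: r) = (c :: (splitC r).1, (splitC r).2) := by
        simp [splitC, hc]
      rw [hsp]
      by_cases hs : PySem.Chars.isspace c
      · have hstep : altStep (urls, cur, done) c = (urls, cur, done || !cur.isEmpty) := by
          simp [altStep, hc, hs]
        rw [hstep, ih]
        have hfo : firstOut cur (done || !cur.isEmpty) (splitC r).1 =
            firstOut cur done (c :: (splitC r).1) := by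
          unfold firstOut
          by_cases hd : done
          · simp [hd]
          · by_cases hcur : cur = []
            · simp [hd, hcur, tok, hs]
            · simp [hd, hcur, nsp, hs]
        rw [hfo]
      · by_cases hd : done
        · have hstep : altStep (urls, cur, done) c = (urls, cur, done) := by
            simp [altStep, hc, hs, hd]
          rw [hstep, ih]
          have hfo : firstOut cur done (splitC r).1 = firstOut cur done (c :: (splitC r).1) := by
            simp [firstOut, hd]
          rw [hfo]
        · have hstep : altStep (urls, cur, done) c = (urls, cur ++ [c], done) := by
            simp [altStep, hc, hs, hd]
          rw [hstep, ih]
          have hfo : firstOut (cur ++ [c]) done (splitC r).1 =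
              firstOut cur done (c :: (splitC r).1) := by
            unfold firstOut
            by_cases hcur : cur = []
            · simp [hd, hcur, tok, hs, nsp]
            · simp [hd, hcur, nsp, hs]
          rw [hfo]

theorem b_eq_ref (s : String) : extract_urls_from_srcset_alt s = refOut s.toList := by
  show flushSt (s.toList.foldl altStep ([], [], false)) = _
  rw [alt_go]
  simp [firstOut, refOut]

-- ===== VERDICT (by name: the statement is the Claim_ definition above) =====
theorem extract_urls_from_srcset_spec : Claim_equal_extract_urls_from_srcset := by
  intro s _
  show extract_urls_from_srcset s = extract_urls_from_srcset_alt s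
  rw [a_eq_ref, b_eq_ref]
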